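-- pv_equiv track=rewrite | github.com/matheuscordeiro/HackerRank | Interview Preparation/Sorting/fraudulent_activity_notifications.py | get_median_2x
-- ===== SOURCE A (Python) =====
-- def get_median_2x(count_array, d):
--     count_numbers = 0
--     ref1, ref2 = d//2, d//2 + 1
--     a = b = 0
--     for key, value in enumerate(count_array):
--         count_numbers += value
--         if ref1 <= count_numbers and not a:
--             a = key
--         if ref2 <= count_numbers:
--             b = key
--             break
--
--     return b*2 if d%2 else a+b
-- ===== SOURCE B (Python) =====
-- def get_median_2x(count_array, d):
--     prefix = []
--     total = 0
--     for value in count_array: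
--         total += value
--         prefix.append(total)
--     ref1, ref2 = d // 2, d // 2 + 1
--     a = next((key for key, p in enumerate(prefix) if p >= ref1), 0)
--     b = next((key for key, p in enumerate(prefix) if p >= ref2), 0)
--     return b * 2 if d % 2 else a + b
-- ===== Notes on version B (the rewrite author's own statement) =====
-- stated objective: idiomatic
-- what changed: B precomputes the prefix-sum list once and finds each median bucket index with an independent first-index search (next over enumerate, default 0), replacing A's fused single-pass scan with sentinel flags and an early break.
-- intended difference: On even d whose first bucket's prefix sum equals d//2 exactly while a later prefix sum reaches it too (the lower median is key 0 but the scan continues), A's `not a` test treats the correctly recorded a=0 as unset and overwrites it with a later key, returning B's value plus that key; B returns the intended sum of the two median bucket indices. — e.g. on get_median_2x([1, 1], 2): A returns 2, B returns 1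
import Mathlib
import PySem

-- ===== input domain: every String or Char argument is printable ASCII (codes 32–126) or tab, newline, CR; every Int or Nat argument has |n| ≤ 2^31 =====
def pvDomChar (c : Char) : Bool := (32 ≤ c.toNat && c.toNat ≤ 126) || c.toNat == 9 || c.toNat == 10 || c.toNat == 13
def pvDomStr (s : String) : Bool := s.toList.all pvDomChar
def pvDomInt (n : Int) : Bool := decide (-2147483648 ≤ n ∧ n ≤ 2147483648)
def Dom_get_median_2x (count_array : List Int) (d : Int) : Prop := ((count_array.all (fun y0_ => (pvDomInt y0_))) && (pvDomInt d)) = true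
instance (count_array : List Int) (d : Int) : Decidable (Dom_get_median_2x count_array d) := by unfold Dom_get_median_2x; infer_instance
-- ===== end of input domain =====

-- B precomputes the prefix-sum list and finds each median bucket index with an independent
-- first-index search (default 0), replacing A's fused single-pass scan with sentinel flags and
-- early break (objective: idiomatic); on even d whose lower median is bucket 0 but whose scan
-- continues, A's `not a` sentinel misfires (see D_) and B returns the intended value.

-- ===== PORT A =====
def goA (ref1 ref2 : Int) : List Int → Int → Int → Int → Int × Int
  | [], _, _, a => (a, 0)
  | v :: rest, key, cnt, a =>
    let c := cnt + v
    let a' := if ref1 ≤ c ∧ a = 0 then key else a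
    if ref2 ≤ c then (a', key) else goA ref1 ref2 rest (key + 1) c a'

def get_median_2x (count_array : List Int) (d : Int) : Int :=
  let ref1 := PySem.Int.floordiv d 2
  let ref2 := ref1 + 1
  let ab := goA ref1 ref2 count_array 0 0 0
  if PySem.Int.mod d 2 ≠ 0 then ab.2 * 2 else ab.1 + ab.2

-- ===== PORT B =====
-- port of next((key for key, p in enumerate(prefix) if p >= thr), 0)
def findGe0 (thr : Int) : List (Int × Int) → Int
  | [] => 0
  | kp :: rest => if thr ≤ kp.2 then kp.1 else findGe0 thr rest

def get_median_2x_alt (count_array : List Int) (d : Int) : Int :=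
  let pt := count_array.foldl
      (fun (st : List Int × Int) value => (st.1 ++ [st.2 + value], st.2 + value)) ([], 0)
  let pref := pt.1
  let ref1 := PySem.Int.floordiv d 2
  let ref2 := PySem.Int.floordiv d 2 + 1
  let a := findGe0 ref1 (PySem.List.enumerate pref)
  let b := findGe0 ref2 (PySem.List.enumerate pref)
  if PySem.Int.mod d 2 ≠ 0 then b * 2 else a + b

-- ===== PRECONDITION & SPEC =====
-- (no Pre_: both programs are total)

-- On even d whose first prefix sum equals d//2 exactly while a later prefix sum also reaches
-- d//2 (the lower median is bucket 0 but the scan continues), A's `not a` test treats the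
-- correctly recorded a = 0 as unset and overwrites it with a later key, returning B's value
-- plus that key; B returns the intended sum of the two median bucket indices.
def D_get_median_2x (count_array : List Int) (d : Int) : Prop :=
  2 ∣ d ∧ count_array.head? = some (d / 2) ∧
    ∃ i < count_array.length - 1, d / 2 ≤ (count_array.take (i + 2)).sum
instance (count_array : List Int) (d : Int) : Decidable (D_get_median_2x count_array d) := by
  unfold D_get_median_2x; infer_instance

def Spec_get_median_2x (count_array : List Int) (d : Int) (out : Int) : Prop :=
  ¬ D_get_median_2x count_array d → out = get_median_2x_alt count_array d
instance (count_array : List Int) (d : Int) (out : Int) : Decidable (Spec_get_median_2x count_array d out) := by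
  unfold Spec_get_median_2x; infer_instance

def pvDiffWitness_get_median_2x : List Int × Int := ([1, 1], 2)
def pvDiffWitnessOut_get_median_2x : Int × Int := (2, 1)

-- ===== CLAIM (what is proved, stated in full; the proofs are below) =====
def Claim_unchanged_get_median_2x : Prop := ∀ (count_array : List Int) (d : Int), Dom_get_median_2x count_array d → Spec_get_median_2x count_array d (get_median_2x count_array d)
def Claim_changed_get_median_2x : Prop := Dom_get_median_2x (pvDiffWitness_get_median_2x.1) (pvDiffWitness_get_median_2x.2) ∧ D_get_median_2x (pvDiffWitness_get_median_2x.1) (pvDiffWitness_get_median_2x.2) ∧ get_median_2x (pvDiffWitness_get_median_2x.1) (pvDiffWitness_get_median_2x.2) = pvDiffWitnessOut_get_median_2x.1 ∧ get_median_2x_alt (pvDiffWitness_get_median_2x.1) (pvDiffWitness_get_median_2x.2) = pvDiffWitnessOut_get_median_2x.2 ∧ pvDiffWitnessOut_get_median_2x.1 ≠ pvDiffWitnessOut_get_median_2x.2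
def Claim_exact_get_median_2x : Prop := ∀ (count_array : List Int) (d : Int), Dom_get_median_2x count_array d → D_get_median_2x count_array d → get_median_2x count_array d ≠ get_median_2x_alt count_array d

-- ===== LEMMAS AND PROOFS =====

-- first key (starting at `key`, running total `cnt`) whose prefix sum reaches thr, else 0:
-- the common scan both ports reduce to
def fB (thr : Int) : List Int → Int → Int → Int
  | [], _, _ => 0
  | v :: rest, key, cnt => if thr ≤ cnt + v then key else fB thr rest (key + 1) (cnt + v)

-- prefix sums starting from running total t (proof-side mirror of B's foldl)
def prefixFrom (t : Int) : List Int → List Int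
  | [] => []
  | v :: rest => (t + v) :: prefixFrom (t + v) rest

lemma prefix_foldl : ∀ (xs : List Int) (acc : List Int) (t : Int),
    xs.foldl (fun (st : List Int × Int) value => (st.1 ++ [st.2 + value], st.2 + value)) (acc, t)
      = (acc ++ prefixFrom t xs, t + xs.sum) := by
  intro xs
  induction xs with
  | nil => intro acc t; simp [prefixFrom]
  | cons v rest ih =>
      intro acc t
      simp only [List.foldl_cons, ih, prefixFrom, List.append_assoc, List.singleton_append,
        List.sum_cons]
      exact Prod.ext rfl (by ring)

lemma findGe0_fB (thr : Int) : ∀ (xs : List Int) (key t : Int),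
    findGe0 thr (PySem.List.enumerate (prefixFrom t xs) key) = fB thr xs key t := by
  intro xs
  induction xs with
  | nil => intro key t; simp [prefixFrom, PySem.List.enumerate_nil, findGe0, fB]
  | cons v rest ih =>
      intro key t
      simp only [prefixFrom, PySem.List.enumerate_cons, findGe0, fB, ih]

lemma goA_snd (ref1 ref2 : Int) : ∀ (xs : List Int) (key cnt a : Int),
    (goA ref1 ref2 xs key cnt a).2 = fB ref2 xs key cnt := by
  intro xs
  induction xs with
  | nil => intro key cnt a; simp [goA, fB]
  | cons v rest ih =>
      intro key cnt a
      simp only [goA, fB]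
      by_cases hb : ref2 ≤ cnt + v
      · rw [if_pos hb, if_pos hb]
      · rw [if_neg hb, if_neg hb, ih]

lemma goA_fst_nz (ref1 ref2 : Int) : ∀ (xs : List Int) (key cnt a : Int),
    a ≠ 0 → (goA ref1 ref2 xs key cnt a).1 = a := by
  intro xs
  induction xs with
  | nil => intro key cnt a _; simp [goA]
  | cons v rest ih =>
      intro key cnt a ha
      simp only [goA]
      have hz : (if ref1 ≤ cnt + v ∧ a = 0 then key else a) = a := by
        rw [if_neg (by simp [ha])]
      rw [hz]
      by_cases hb : ref2 ≤ cnt + v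
      · rw [if_pos hb]
      · rw [if_neg hb]; exact ih _ _ _ ha

lemma goA_fst (ref1 ref2 : Int) (href : ref2 = ref1 + 1) : ∀ (xs : List Int) (key cnt : Int),
    1 ≤ key → (goA ref1 ref2 xs key cnt 0).1 = fB ref1 xs key cnt := by
  intro xs
  induction xs with
  | nil => intro key cnt _; simp [goA, fB]
  | cons v rest ih =>
      intro key cnt hkey
      simp only [goA, fB]
      rw [show (if ref1 ≤ cnt + v ∧ True then key else (0:Int))
          = if ref1 ≤ cnt + v then key else 0 from by simp]
      by_cases hb : ref2 ≤ cnt + v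
      · rw [if_pos hb, if_pos (show ref1 ≤ cnt + v from by omega),
          if_pos (show ref1 ≤ cnt + v from by omega)]
      · rw [if_neg hb]
        by_cases ha : ref1 ≤ cnt + v
        · rw [if_pos ha, if_pos ha, goA_fst_nz ref1 ref2 rest (key + 1) (cnt + v) key (by omega)]
        · rw [if_neg ha, if_neg ha, ih (key + 1) (cnt + v) (by omega)]

lemma fB_zero (thr : Int) : ∀ (xs : List Int) (key cnt : Int),
    (∀ i < xs.length, cnt + (xs.take (i + 1)).sum < thr) → fB thr xs key cnt = 0 := by
  intro xs
  induction xs with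
  | nil => intro key cnt _; simp [fB]
  | cons v rest ih =>
      intro key cnt h
      have h0 := h 0 (by simp)
      simp only [List.take_succ_cons, List.take_zero, List.sum_cons, List.sum_nil] at h0
      simp only [fB]
      rw [if_neg (by omega)]
      refine ih (key + 1) (cnt + v) (fun i hi => ?_)
      have := h (i + 1) (by simp; omega)
      simp only [List.take_succ_cons, List.sum_cons] at this
      omega

lemma fB_pos (thr : Int) : ∀ (xs : List Int) (key cnt : Int), 1 ≤ key →
    (∃ i < xs.length, thr ≤ cnt + (xs.take (i + 1)).sum) → 1 ≤ fB thr xs key cnt := by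
  intro xs
  induction xs with
  | nil => intro key cnt _ h; simp at h
  | cons v rest ih =>
      intro key cnt hkey h
      simp only [fB]
      by_cases hb : thr ≤ cnt + v
      · rw [if_pos hb]; omega
      · rw [if_neg hb]
        obtain ⟨i, hi, hs⟩ := h
        match i, hi, hs with
        | 0, _, hs =>
            simp only [List.take_succ_cons, List.take_zero, List.sum_cons, List.sum_nil] at hs
            omega
        | i + 1, hi, hs =>
            simp only [List.take_succ_cons, List.sum_cons] at hs
            exact ih (key + 1) (cnt + v) (by omega) ⟨i, by simp at hi; omega, by omega⟩

-- B's port written through fB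
lemma alt_eq (count_array : List Int) (d : Int) :
    get_median_2x_alt count_array d =
      if PySem.Int.mod d 2 ≠ 0 then fB (PySem.Int.floordiv d 2 + 1) count_array 0 0 * 2
      else fB (PySem.Int.floordiv d 2) count_array 0 0
           + fB (PySem.Int.floordiv d 2 + 1) count_array 0 0 := by
  unfold get_median_2x_alt
  rw [prefix_foldl count_array [] 0]
  simp only [List.nil_append, findGe0_fB]

-- ===== VERDICT (by name: the statement is the Claim_ definition above) =====
theorem get_median_2x_spec : Claim_unchanged_get_median_2x := by
  intro xs d _ hnd
  have hfd : PySem.Int.floordiv d 2 = d / 2 := PySem.Int.floordiv_eq_ediv_of_pos (by omega)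
  have hmd : PySem.Int.mod d 2 = d % 2 := PySem.Int.mod_eq_emod_of_pos (by omega)
  unfold get_median_2x
  rw [alt_eq]
  simp only [hfd, hmd]
  set r1 : Int := d / 2 with hr1
  by_cases hodd : d % 2 ≠ 0
  · rw [if_pos hodd, if_pos hodd, goA_snd]
  · rw [if_neg hodd, if_neg hodd]
    simp only [ne_eq, not_not] at hodd
    rw [goA_snd]
    match xs, hnd with
    | [], _ => simp [goA, fB]
    | v :: rest, hnd =>
      simp only [goA, fB, and_true]
      rw [show (if r1 ≤ 0 + v then (0:Int) else 0) = 0 from by split <;> rfl]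
      by_cases hb : r1 + 1 ≤ 0 + v
      · rw [if_pos hb, if_pos (show r1 ≤ 0 + v from by omega), if_pos hb]
      · rw [if_neg hb, if_neg hb]
        by_cases hc : r1 ≤ 0 + v
        · have hveq : v = r1 := by omega
          have hnoc : ∀ i < rest.length, (0 + v) + (rest.take (i + 1)).sum < r1 := by
            intro i hi
            by_contra hcon
            refine hnd ⟨by omega, by simp [hveq, hr1], ⟨i, by simp; omega, ?_⟩⟩
            simp only [List.take_succ_cons, List.sum_cons]
            omega
          rw [if_pos hc, goA_fst r1 (r1 + 1) rfl rest (0 + 1) (0 + v) (by omega)]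
          rw [fB_zero r1 rest (0 + 1) (0 + v) hnoc]
        · rw [if_neg hc, goA_fst r1 (r1 + 1) rfl rest (0 + 1) (0 + v) (by omega)]

theorem get_median_2x_changed : Claim_changed_get_median_2x := by
  unfold Claim_changed_get_median_2x; decide

theorem get_median_2x_tight : Claim_exact_get_median_2x := by
  intro xs d _ hD
  obtain ⟨hdvd, hhead, i, hi, hsum⟩ := hD
  have hfd : PySem.Int.floordiv d 2 = d / 2 := PySem.Int.floordiv_eq_ediv_of_pos (by omega)
  have hmd : PySem.Int.mod d 2 = d % 2 := PySem.Int.mod_eq_emod_of_pos (by omega)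
  have hodd : d % 2 = 0 := by omega
  unfold get_median_2x
  rw [alt_eq]
  simp only [hfd, hmd, hodd, ne_eq, not_true_eq_false, if_false]
  set r1 : Int := d / 2 with hr1
  match xs, hhead, hi, hsum with
  | [], hhead, _, _ => exact absurd hhead (by simp)
  | v :: rest, hhead, hi, hsum =>
    have hveq : v = r1 := by simpa using hhead
    have hi' : i < rest.length := by simp at hi; omega
    have hsum' : r1 ≤ (0 + v) + (rest.take (i + 1)).sum := by
      simp only [List.take_succ_cons, List.sum_cons] at hsum
      omega
    rw [goA_snd]
    simp only [goA, fB, and_true]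
    rw [show (if r1 ≤ 0 + v then (0:Int) else 0) = 0 from by split <;> rfl]
    rw [if_neg (show ¬ r1 + 1 ≤ 0 + v from by omega),
      if_pos (show r1 ≤ 0 + v from by omega),
      if_neg (show ¬ r1 + 1 ≤ 0 + v from by omega)]
    rw [goA_fst r1 (r1 + 1) rfl rest (0 + 1) (0 + v) (by omega)]
    have hp : 1 ≤ fB r1 rest (0 + 1) (0 + v) :=
      fB_pos r1 rest (0 + 1) (0 + v) (by omega) ⟨i, hi', hsum'⟩
    omega
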